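-- pv_equiv track=rewrite | github.com/cielavenir/checkio | old-library/can-you-jump-through.py | dfs
-- ===== SOURCE A (Python) =====
-- def dfs(data,x,y,xg,yg,c):
-- 	if y<0 or len(data)<=y or x<0 or len(data[0])<=x or data[y][x]!=c: return False
-- 	if x==xg and y==yg: return True
-- 	data[y][x]=-1
-- 	if dfs(data,x,y-1,xg,yg,c): return True
-- 	if dfs(data,x-1,y,xg,yg,c): return True
-- 	if dfs(data,x+1,y,xg,yg,c): return True
-- 	if dfs(data,x,y+1,xg,yg,c): return True
-- 	data[y][x]=c
-- 	return False
-- ===== SOURCE B (Python) =====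
-- # Iterative flood fill with a permanent visited set (no backtracking restore, no mutation of data).
-- def dfs(data, x, y, xg, yg, c):
--     rows = len(data)
--     if y < 0 or rows <= y or x < 0 or len(data[0]) <= x or data[y][x] != c:
--         return False
--     seen = {(x, y)}
--     stack = [(x, y)]
--     while stack:
--         px, py = stack.pop()
--         if px == xg and py == yg:
--             return True
--         for q in ((px, py - 1), (px - 1, py), (px + 1, py), (px, py + 1)):
--             qx, qy = q
--             if 0 <= qy < rows and 0 <= qx < len(data[0]) and q not in seen and data[qy][qx] == c:
--                 seen.add(q)
--                 stack.append(q)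
--     return False
-- ===== Notes on version B (the rewrite author's own statement) =====
-- stated objective: alternative
-- what changed: Replaces the recursive DFS that marks a cell and restores it on backtracking (and mutates data in place) with an iterative flood fill: an explicit stack and a permanent visited set, never mutating data; each cell is pushed at most once instead of being re-explored on every simple path.
-- outside the precondition, e.g. on dfs([[1, 1], [1]], 0, 0, 1, 0, 1): A returns True, B raises IndexError; on dfs([[-1]], 0, 0, 0, 0, -1): A returns True, B returns True; on dfs([[-1, -1], [-1, -1]], 0, 0, 3, 3, -1): A raises RecursionError, B returns False
import Mathlib
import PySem

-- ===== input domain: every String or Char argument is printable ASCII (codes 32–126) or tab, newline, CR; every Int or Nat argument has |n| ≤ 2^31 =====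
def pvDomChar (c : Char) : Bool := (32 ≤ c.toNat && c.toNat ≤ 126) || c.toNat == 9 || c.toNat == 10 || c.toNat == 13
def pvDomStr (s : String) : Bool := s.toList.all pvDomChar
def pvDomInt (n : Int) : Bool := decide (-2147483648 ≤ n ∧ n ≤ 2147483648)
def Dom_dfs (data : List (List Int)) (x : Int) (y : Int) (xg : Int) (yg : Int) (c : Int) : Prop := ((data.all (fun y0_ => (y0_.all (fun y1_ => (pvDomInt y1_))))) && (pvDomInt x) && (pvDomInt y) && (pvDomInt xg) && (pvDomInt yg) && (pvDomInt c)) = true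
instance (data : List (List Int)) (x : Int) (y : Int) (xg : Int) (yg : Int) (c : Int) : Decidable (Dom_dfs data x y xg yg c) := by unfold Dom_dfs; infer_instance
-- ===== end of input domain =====

-- B replaces A's mark-and-restore recursive DFS with an iterative flood fill (explicit
-- stack + permanent visited set); the equivalence proved is about the RETURN value only:
-- A mutates `data` in place (on success the found path stays marked -1), B never mutates it.

-- shared grid accessors (data[y][x] and len(data[0]); exact under the in-range guards both programs make)
def gcell (data : List (List Int)) (x y : Int) : Int :=
  PySem.List.pyGetD (PySem.List.pyGetD data y []) x 0

def gcols (data : List (List Int)) : Int := ((data.headD []).length : Int)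

-- ===== PORT A =====
-- data[y][x] = v
def setCell (data : List (List Int)) (x y : Int) (v : Int) : List (List Int) :=
  PySem.List.pySetD data y (PySem.List.pySetD (PySem.List.pyGetD data y []) x v)

-- number of cells equal to c: fuel bound for the recursion (totality guard only; the
-- recursion depth of A never exceeds it on inputs satisfying Pre_)
def countC (data : List (List Int)) (c : Int) : Nat := (data.map (fun r => r.count c)).sum

def dfsA (fuel : Nat) (data : List (List Int)) (x y xg yg c : Int) :
    Bool × List (List Int) :=
  match fuel with
  | 0 => (false, data)
  | fuel + 1 =>
    if y < 0 ∨ (data.length : Int) ≤ y ∨ x < 0 ∨ gcols data ≤ x ∨ gcell data x y ≠ c then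
      (false, data)
    else if x = xg ∧ y = yg then (true, data)
    else
      let d0 := setCell data x y (-1)
      match dfsA fuel d0 x (y - 1) xg yg c with
      | (true, d1) => (true, d1)
      | (false, d1) =>
        match dfsA fuel d1 (x - 1) y xg yg c with
        | (true, d2) => (true, d2)
        | (false, d2) =>
          match dfsA fuel d2 (x + 1) y xg yg c with
          | (true, d3) => (true, d3)
          | (false, d3) =>
            match dfsA fuel d3 x (y + 1) xg yg c with
            | (true, d4) => (true, d4)
            | (false, d4) => (false, setCell d4 x y c)

def dfs (data : List (List Int)) (x : Int) (y : Int) (xg : Int) (yg : Int) (c : Int) : Bool :=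
  (dfsA (countC data c + 1) data x y xg yg c).1

-- ===== PORT B =====
-- the four neighbours (px,py-1),(px-1,py),(px+1,py),(px,py+1)
def nbrs (p : Int × Int) : List (Int × Int) :=
  [(p.1, p.2 - 1), (p.1 - 1, p.2), (p.1 + 1, p.2), (p.1, p.2 + 1)]

-- loop body of B's `for q in …`: push q if in bounds, unseen and of colour c
def bpush (data : List (List Int)) (c : Int)
    (acc : List (Int × Int) × PySem.Set (Int × Int)) (q : Int × Int) :
    List (Int × Int) × PySem.Set (Int × Int) :=
  if 0 ≤ q.2 ∧ q.2 < (data.length : Int) ∧ 0 ≤ q.1 ∧ q.1 < gcols data ∧ q ∉ acc.2 ∧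
      gcell data q.1 q.2 = c then
    (acc.1 ++ [q], PySem.Set.add acc.2 q)
  else acc

-- all in-bounds coordinates (x,y); only used by bloop's termination measure
def allCells (data : List (List Int)) : List (Int × Int) :=
  (List.range data.length).flatMap
    (fun j => (List.range (data.headD []).length).map (fun i => ((i : Int), (j : Int))))

def bmeasure (data : List (List Int)) (stack : List (Int × Int))
    (seen : PySem.Set (Int × Int)) : Nat :=
  5 * ((allCells data).filter (fun q => decide (q ∉ seen))).length + stack.length

theorem filter_len_le {α : Type} (l : List α) (p p' : α → Bool)
    (himp : ∀ x, p' x = true → p x = true) :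
    (l.filter p').length ≤ (l.filter p).length := by
  induction l with
  | nil => simp
  | cons a t ih =>
    by_cases h' : p' a = true
    · rw [List.filter_cons_of_pos h', List.filter_cons_of_pos (himp a h')]
      simpa using ih
    · rw [List.filter_cons_of_neg (by simpa using h')]
      by_cases h : p a = true
      · rw [List.filter_cons_of_pos h]; exact le_trans ih (by simp)
      · rw [List.filter_cons_of_neg (by simpa using h)]; exact ih

theorem filter_len_lt {α : Type} (l : List α) (p p' : α → Bool) (q : α) (hq : q ∈ l)
    (hp : p q = true) (hp' : p' q = false) (himp : ∀ x, p' x = true → p x = true) :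
    (l.filter p').length < (l.filter p).length := by
  induction l with
  | nil => cases hq
  | cons a t ih =>
    rcases List.mem_cons.1 hq with rfl | hq
    · rw [List.filter_cons_of_pos hp, List.filter_cons_of_neg (by simp [hp'])]
      exact Nat.lt_succ_of_le (filter_len_le t p p' himp)
    · by_cases h' : p' a = true
      · rw [List.filter_cons_of_pos h', List.filter_cons_of_pos (himp a h')]
        simpa using ih hq
      · rw [List.filter_cons_of_neg (by simpa using h')]
        by_cases h : p a = true
        · rw [List.filter_cons_of_pos h]; exact lt_of_lt_of_le (ih hq) (by simp)
        · rw [List.filter_cons_of_neg (by simpa using h)]; exact ih hq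

theorem mem_allCells (data : List (List Int)) (q : Int × Int) (hx0 : 0 ≤ q.1)
    (hx1 : q.1 < gcols data) (hy0 : 0 ≤ q.2) (hy1 : q.2 < (data.length : Int)) :
    q ∈ allCells data := by
  unfold gcols at *
  obtain ⟨a, b⟩ := q
  simp only [allCells, List.mem_flatMap, List.mem_map] at *
  simp only [List.pure_def, List.bind_eq_flatMap, List.mem_flatMap, List.mem_cons,
    List.mem_range, List.not_mem_nil, or_false] at *
  refine ⟨b, ⟨b.toNat, by omega, by omega⟩, a, ⟨a.toNat, by omega, by omega⟩, rfl⟩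

theorem set_add_not_mem {α : Type} [BEq α] [LawfulBEq α] (s : PySem.Set α) (q : α)
    (h : q ∉ s) : PySem.Set.add s q = s ++ [q] := by
  simp [PySem.Set.add]
  intro hc
  exact absurd (by simpa using hc) h

theorem bpush_one_measure (data : List (List Int)) (c : Int)
    (acc : List (Int × Int) × PySem.Set (Int × Int)) (q : Int × Int) :
    bmeasure data (bpush data c acc q).1 (bpush data c acc q).2 ≤
      bmeasure data acc.1 acc.2 := by
  unfold bpush
  split
  · next hg =>
    obtain ⟨h1, h2, h3, h4, h5, h6⟩ := hg
    have hmem : q ∈ allCells data := mem_allCells data q h3 h4 h1 h2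
    have hadd : PySem.Set.add acc.2 q = acc.2 ++ [q] := set_add_not_mem acc.2 q h5
    have hlt : ((allCells data).filter (fun r => decide (r ∉ PySem.Set.add acc.2 q))).length <
        ((allCells data).filter (fun r => decide (r ∉ acc.2))).length := by
      apply filter_len_lt (allCells data) _ _ q hmem
      · simpa using h5
      · simp [hadd]
      · intro x hx
        simp [hadd] at hx ⊢
        exact hx.1
    unfold bmeasure
    simp only [List.length_append, List.length_cons, List.length_nil]
    omega
  · exact le_refl _

theorem bpush_measure (data : List (List Int)) (c : Int) (qs : List (Int × Int)) :
    ∀ acc : List (Int × Int) × PySem.Set (Int × Int),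
      bmeasure data (qs.foldl (bpush data c) acc).1 (qs.foldl (bpush data c) acc).2 ≤
        bmeasure data acc.1 acc.2 := by
  induction qs with
  | nil => intro acc; exact le_refl _
  | cons q qs ih =>
    intro acc
    exact le_trans (ih (bpush data c acc q)) (bpush_one_measure data c acc q)

-- B's while-loop: pop from the end of the stack, return True on the goal, else push
-- the admissible neighbours (permanently marking them seen) and continue
def bloop (data : List (List Int)) (xg yg c : Int) (stack : List (Int × Int))
    (seen : PySem.Set (Int × Int)) : Bool × PySem.Set (Int × Int) :=
  if h : stack = [] then (false, seen)
  else
    let p := stack.getLast h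
    if p.1 = xg ∧ p.2 = yg then (true, seen)
    else
      let r := (nbrs p).foldl (bpush data c) (stack.dropLast, seen)
      bloop data xg yg c r.1 r.2
termination_by bmeasure data stack seen
decreasing_by
  calc bmeasure data r.1 r.2 ≤ bmeasure data stack.dropLast seen := bpush_measure data c _ _
    _ < bmeasure data stack seen := by
        unfold bmeasure
        have : stack.dropLast.length < stack.length := by
          have : stack.length ≠ 0 := fun h0 => h (List.eq_nil_of_length_eq_zero h0)
          simp [List.length_dropLast]; omega
        omega

def dfs_alt (data : List (List Int)) (x : Int) (y : Int) (xg : Int) (yg : Int) (c : Int) : Bool :=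
  if y < 0 ∨ (data.length : Int) ≤ y ∨ x < 0 ∨ gcols data ≤ x ∨ gcell data x y ≠ c then false
  else (bloop data xg yg c [(x, y)] (PySem.Set.ofList [(x, y)])).1

-- ===== PRECONDITION & SPEC =====
-- the grid is rectangular
def Rect (data : List (List Int)) : Prop :=
  ∀ row ∈ data, row.length = (data.headD []).length

-- the first line of A returns False outright (so no cell is ever visited)
def ImmFalse (data : List (List Int)) (x y c : Int) : Prop :=
  y < 0 ∨ (data.length : Int) ≤ y ∨ x < 0 ∨ gcols data ≤ x ∨
    (x < ((PySem.List.pyGetD data y []).length : Int) ∧ gcell data x y ≠ c)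

-- Pre_ excludes (unless A returns False on its first line) non-rectangular grids, on which
-- A can raise IndexError on a short row, and the colour c = -1, which collides with A's
-- in-place "visited" marker -1 so that A recurses forever (RecursionError) on grids with
-- adjacent -1 cells.
def Pre_dfs (data : List (List Int)) (x : Int) (y : Int) (xg : Int) (yg : Int) (c : Int) : Prop :=
  ImmFalse data x y c ∨ (Rect data ∧ c ≠ -1)

instance (data : List (List Int)) (x : Int) (y : Int) (xg : Int) (yg : Int) (c : Int) : Decidable (Pre_dfs data x y xg yg c) := by
  unfold Pre_dfs; unfold ImmFalse Rect; infer_instance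

def pvWitness_dfs : List (List Int) × Int × Int × Int × Int × Int :=
  ([[1, 1], [0, 1]], 0, 0, 1, 1, 1)

def Spec_dfs (data : List (List Int)) (x : Int) (y : Int) (xg : Int) (yg : Int) (c : Int) (out : Bool) : Prop := out = dfs_alt data x y xg yg c
instance (data : List (List Int)) (x : Int) (y : Int) (xg : Int) (yg : Int) (c : Int) (out : Bool) : Decidable (Spec_dfs data x y xg yg c out) := by unfold Spec_dfs; infer_instance

-- ===== CLAIM (what is proved, stated in full; the proofs are below) =====
def Claim_equal_dfs : Prop := ∀ (data : List (List Int)) (x : Int) (y : Int) (xg : Int) (yg : Int) (c : Int), Dom_dfs data x y xg yg c → Pre_dfs data x y xg yg c → Spec_dfs data x y xg yg c (dfs data x y xg yg c)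

-- ===== LEMMAS AND PROOFS =====

-- cell (p.1, p.2) is in bounds and holds colour c
def avail (data : List (List Int)) (c : Int) (p : Int × Int) : Prop :=
  0 ≤ p.2 ∧ p.2 < (data.length : Int) ∧ 0 ≤ p.1 ∧ p.1 < gcols data ∧ gcell data p.1 p.2 = c

def adj (p q : Int × Int) : Prop := q ∈ nbrs p

-- connectivity through cells of colour c (snoc-style, grown at the far end)
inductive Conn (data : List (List Int)) (c : Int) : (Int × Int) → (Int × Int) → Prop
  | refl (p : Int × Int) : avail data c p → Conn data c p p
  | tail {p q r : Int × Int} : Conn data c p q → adj q r → avail data c r →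
      Conn data c p r

-- reachability of the goal, indexed by path length (cons-style, grown at the near end)
inductive Reach (data : List (List Int)) (xg yg c : Int) : (Int × Int) → Nat → Prop
  | goal : avail data c (xg, yg) → Reach data xg yg c (xg, yg) 0
  | step {p q : Int × Int} {n : Nat} : avail data c p → adj p q →
      Reach data xg yg c q n → Reach data xg yg c p (n + 1)

-- ---------- bridges from the PySem accessors to Nat-indexed list operations ----------

theorem setCell_eq (d : List (List Int)) {x y : Int} (v : Int) (hx : 0 ≤ x) (hy : 0 ≤ y) :
    setCell d x y v = d.set y.toNat ((d.getD y.toNat []).set x.toNat v) := by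
  unfold setCell
  rw [PySem.List.pyGetD_of_nonneg _ _ hy, PySem.List.pySetD_of_nonneg _ _ hx,
    PySem.List.pySetD_of_nonneg _ _ hy]

theorem gcell_eq (d : List (List Int)) {x y : Int} (hx : 0 ≤ x) (hy : 0 ≤ y) :
    gcell d x y = (d.getD y.toNat []).getD x.toNat 0 := by
  unfold gcell
  rw [PySem.List.pyGetD_of_nonneg _ _ hy, PySem.List.pyGetD_of_nonneg _ _ hx]

theorem gcols_getD (d : List (List Int)) : gcols d = ((d.getD 0 []).length : Int) := by
  cases d <;> simp [gcols]

-- ---------- grid lemmas about setCell / gcell / Rect / countC ----------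

theorem len_setCell (d : List (List Int)) {x y : Int} (v : Int) (hx : 0 ≤ x) (hy : 0 ≤ y) :
    (setCell d x y v).length = d.length := by
  rw [setCell_eq d v hx hy]; exact List.length_set

theorem getD_set_eq_ite {α : Type} (l : List α) (i j : Nat) (a dflt : α) :
    (l.set i a).getD j dflt = if i = j ∧ i < l.length then a else l.getD j dflt := by
  simp only [List.getD_eq_getElem?_getD]
  by_cases h : i = j
  · subst h
    by_cases hl : i < l.length
    · simp [hl]
    · have hle : l.length ≤ i := Nat.le_of_not_lt hl
      rw [List.getElem?_eq_none (by simpa [List.length_set] using hle),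
        List.getElem?_eq_none (by simpa using hle)]
      simp [hl]
  · simp [List.getElem?_set_ne h, h]

theorem row_len_setCell (d : List (List Int)) {x y : Int} (v : Int) (hx : 0 ≤ x) (hy : 0 ≤ y)
    (j : Nat) : ((setCell d x y v).getD j []).length = (d.getD j []).length := by
  rw [setCell_eq d v hx hy, getD_set_eq_ite]
  split_ifs with h
  · rw [List.length_set, h.1]
  · rfl

theorem gcols_setCell (d : List (List Int)) {x y : Int} (v : Int) (hx : 0 ≤ x) (hy : 0 ≤ y) :
    gcols (setCell d x y v) = gcols d := by
  rw [gcols_getD, gcols_getD]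
  rw [row_len_setCell d v hx hy 0]

theorem gcell_setCell_same (d : List (List Int)) {x y : Int} (v : Int)
    (hx : 0 ≤ x) (hy : 0 ≤ y) (hyl : y < (d.length : Int))
    (hxl : x.toNat < (d.getD y.toNat []).length) :
    gcell (setCell d x y v) x y = v := by
  rw [gcell_eq _ hx hy, setCell_eq d v hx hy, getD_set_eq_ite,
    if_pos ⟨rfl, by omega⟩, getD_set_eq_ite, if_pos ⟨rfl, hxl⟩]

theorem gcell_setCell_other (d : List (List Int)) {x y x' y' : Int} (v : Int)
    (hx : 0 ≤ x) (hy : 0 ≤ y) (hx' : 0 ≤ x') (hy' : 0 ≤ y')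
    (hne : (x', y') ≠ (x, y)) :
    gcell (setCell d x y v) x' y' = gcell d x' y' := by
  rw [gcell_eq _ hx' hy', gcell_eq _ hx' hy', setCell_eq d v hx hy, getD_set_eq_ite]
  split_ifs with h
  · have hyy : y = y' := by omega
    have hxx' : ¬ (x.toNat = x'.toNat ∧ x.toNat < (d.getD y.toNat []).length) := by
      rintro ⟨hc, -⟩
      exact hne (by rw [Prod.mk.injEq]; constructor <;> omega)
    rw [getD_set_eq_ite, if_neg hxx', h.1]
  · rfl

theorem rect_setCell (d : List (List Int)) {x y : Int} (v : Int) (hx : 0 ≤ x) (hy : 0 ≤ y)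
    (hyl : y.toNat < d.length) (hr : Rect d) : Rect (setCell d x y v) := by
  intro row hrow
  have hcols : (((setCell d x y v).headD [])).length = ((d.headD []).length) := by
    have := gcols_setCell d v hx hy
    unfold gcols at this
    omega
  rw [hcols]
  rw [setCell_eq d v hx hy] at hrow
  rcases List.mem_or_eq_of_mem_set hrow with h | h
  · exact hr row h
  · subst h
    rw [List.length_set]
    have hmem : d.getD y.toNat [] ∈ d := by
      rw [List.getD_eq_getElem _ _ hyl]; exact List.getElem_mem hyl
    exact hr _ hmem

theorem count_set_lt (row : List Int) (i : Nat) (c : Int) (h : i < row.length)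
    (hc : row.getD i 0 = c) (hne : c ≠ -1) : (row.set i (-1)).count c < row.count c := by
  induction row generalizing i with
  | nil => simp at h
  | cons a t ih =>
    cases i with
    | zero =>
      simp only [List.getD_eq_getElem _ _ h, List.getElem_cons_zero] at hc
      subst hc
      simp [Ne.symm hne]
    | succ i =>
      have h' : i < t.length := by simpa using h
      have hc' : t.getD i 0 = c := by
        rw [List.getD_eq_getElem _ _ h'] ; rw [List.getD_eq_getElem _ _ h] at hc
        simpa using hc
      simp only [List.set_cons_succ, List.count_cons]
      have := ih i h' hc'
      omega

theorem sum_set_lt (l : List Nat) (j : Nat) (b : Nat) (hj : j < l.length)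
    (hb : b < l.getD j 0) : (l.set j b).sum < l.sum := by
  induction l generalizing j with
  | nil => simp at hj
  | cons a t ih =>
    cases j with
    | zero =>
      simp only [List.getD_eq_getElem _ _ hj, List.getElem_cons_zero] at hb
      simp only [List.set_cons_zero, List.sum_cons]
      omega
    | succ j =>
      have hj' : j < t.length := by simpa using hj
      have hb' : b < t.getD j 0 := by
        rw [List.getD_eq_getElem _ _ hj']
        rw [List.getD_eq_getElem _ _ hj] at hb
        simpa using hb
      simp only [List.set_cons_succ, List.sum_cons]
      have := ih j hj' hb'
      omega

theorem countC_setCell_lt (d : List (List Int)) {x y : Int} (c : Int)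
    (hx : 0 ≤ x) (hy : 0 ≤ y) (hyl : y < (d.length : Int))
    (hxl : x.toNat < (d.getD y.toNat []).length)
    (hc : gcell d x y = c) (hne : c ≠ -1) :
    countC (setCell d x y (-1)) c < countC d c := by
  rw [gcell_eq _ hx hy] at hc
  rw [setCell_eq d (-1) hx hy]
  unfold countC
  rw [List.map_set]
  apply sum_set_lt
  · simpa using (by omega : y.toNat < d.length)
  · have hyl' : y.toNat < d.length := by omega
    have hget : (d.map (fun r => r.count c)).getD y.toNat 0 = (d.getD y.toNat []).count c := by
      rw [List.getD_eq_getElem _ _ (by simpa using hyl'), List.getD_eq_getElem _ _ hyl']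
      simp
    rw [hget]
    exact count_set_lt _ _ _ hxl hc hne

-- avail after marking cell p with -1: exactly the other available cells
theorem avail_setCell (d : List (List Int)) (c : Int) (p q : Int × Int)
    (hp : avail d c p) (hr : Rect d) (hc : c ≠ -1) :
    avail (setCell d p.1 p.2 (-1)) c q ↔ q ≠ p ∧ avail d c q := by
  obtain ⟨hp1, hp2, hp3, hp4, hp5⟩ := hp
  have hxl : p.1.toNat < (d.getD p.2.toNat []).length := by
    have hmem : d.getD p.2.toNat [] ∈ d := by
      rw [List.getD_eq_getElem _ _ (by omega : p.2.toNat < d.length)]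
      exact List.getElem_mem (by omega)
    have := hr _ hmem
    unfold gcols at hp4
    omega
  have hlen := len_setCell d (-1 : Int) hp3 hp1
  have hcols := gcols_setCell d (-1 : Int) hp3 hp1
  unfold avail
  rw [hlen, hcols]
  constructor
  · rintro ⟨h1, h2, h3, h4, h5⟩
    have hqp : q ≠ p := by
      intro hqp
      subst hqp
      rw [gcell_setCell_same d _ hp3 hp1 hp2 hxl] at h5
      exact hc h5.symm
    have hne' : (q.1, q.2) ≠ (p.1, p.2) := by simpa using hqp
    refine ⟨hqp, h1, h2, h3, h4, ?_⟩
    rw [← h5, gcell_setCell_other d _ hp3 hp1 h3 h1 hne']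
  · rintro ⟨hqp, h1, h2, h3, h4, h5⟩
    have hne' : (q.1, q.2) ≠ (p.1, p.2) := by simpa using hqp
    refine ⟨h1, h2, h3, h4, ?_⟩
    rw [gcell_setCell_other d _ hp3 hp1 h3 h1 hne']
    exact h5

-- ---------- lemmas about A's recursion ----------

theorem row_len_rect (d : List (List Int)) {y : Int} (hr : Rect d) (hy : 0 ≤ y)
    (hyl : y < (d.length : Int)) : ((d.getD y.toNat []).length : Int) = gcols d := by
  have hmem : d.getD y.toNat [] ∈ d := by
    rw [List.getD_eq_getElem _ _ (by omega : y.toNat < d.length)]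
    exact List.getElem_mem (by omega)
  have := hr _ hmem
  unfold gcols
  omega

theorem setCell_restore (d : List (List Int)) {x y : Int} (v : Int) (hx : 0 ≤ x) (hy : 0 ≤ y)
    (hyl : y.toNat < d.length) (hxl : x.toNat < (d.getD y.toNat []).length) :
    setCell (setCell d x y v) x y (gcell d x y) = d := by
  rw [gcell_eq _ hx hy, setCell_eq d v hx hy, setCell_eq _ _ hx hy, getD_set_eq_ite,
    if_pos ⟨rfl, by simpa using hyl⟩, List.set_set, List.set_set,
    List.getD_eq_getElem _ _ hxl, List.set_getElem_self hxl,
    List.getD_eq_getElem _ _ hyl, List.set_getElem_self hyl]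

theorem guard_iff (d : List (List Int)) (c x y : Int) :
    (y < 0 ∨ (d.length : Int) ≤ y ∨ x < 0 ∨ gcols d ≤ x ∨ gcell d x y ≠ c) ↔
      ¬ avail d c (x, y) := by
  unfold avail
  dsimp only
  by_cases hg : gcell d x y = c
  · simp [hg]
    omega
  · simp [hg]

theorem avail_of_not_guard (d : List (List Int)) (c x y : Int)
    (h : ¬ (y < 0 ∨ (d.length : Int) ≤ y ∨ x < 0 ∨ gcols d ≤ x ∨ gcell d x y ≠ c)) :
    avail d c (x, y) := by
  by_contra hna
  exact h ((guard_iff d c x y).mpr hna)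

theorem adj_ne (p q : Int × Int) (h : adj p q) : q ≠ p := by
  rcases p with ⟨a, b⟩
  simp [adj, nbrs] at h
  rcases h with h | h | h | h  <;> (subst h; intro hc; rw [Prod.ext_iff] at hc; omega)

theorem reach_avail (d : List (List Int)) (xg yg c : Int) (p : Int × Int) (n : Nat)
    (h : Reach d xg yg c p n) : avail d c p := by
  cases h with
  | goal hg => exact hg
  | step ha _ _ => exact ha

theorem reach_mono (d d' : List (List Int)) (xg yg c : Int)
    (hsub : ∀ q, avail d' c q → avail d c q) (p : Int × Int) (n : Nat)
    (h : Reach d' xg yg c p n) : Reach d xg yg c p n := by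
  induction h with
  | goal hg => exact Reach.goal (hsub _ hg)
  | step ha hadj _ ih => exact Reach.step (hsub _ ha) hadj ih

theorem reach_avoid (d : List (List Int)) (xg yg c : Int) (p : Int × Int)
    (hp : avail d c p) (hr : Rect d) (hc : c ≠ -1) (q : Int × Int) (m : Nat)
    (h : Reach d xg yg c q m) (hqp : q ≠ p) :
    Reach (setCell d p.1 p.2 (-1)) xg yg c q m ∨
      ∃ m', m' < m ∧ Reach d xg yg c p m' := by
  induction h with
  | goal hg =>
    left
    exact Reach.goal ((avail_setCell d c p _ hp hr hc).mpr ⟨hqp, hg⟩)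
  | @step p0 q0 n0 hav hadj hq ihq =>
    by_cases hq0 : q0 = p
    · right
      exact ⟨n0, by omega, hq0 ▸ hq⟩
    · rcases ihq hq0 with h0 | ⟨m', hm', hp'⟩
      · left
        exact Reach.step ((avail_setCell d c p _ hp hr hc).mpr ⟨hqp, hav⟩) hadj h0
      · right
        exact ⟨m', by omega, hp'⟩

theorem dfsA_restore (fuel : Nat) (d : List (List Int)) (x y xg yg c : Int) (hr : Rect d)
    (hf : (dfsA fuel d x y xg yg c).1 = false) : (dfsA fuel d x y xg yg c).2 = d := by
  induction fuel generalizing d x y with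
  | zero => rfl
  | succ fuel ih =>
    by_cases hg : y < 0 ∨ (d.length : Int) ≤ y ∨ x < 0 ∨ gcols d ≤ x ∨ gcell d x y ≠ c
    · simp only [dfsA, if_pos hg]
    · obtain ⟨ha1, ha2, ha3, ha4, ha5⟩ := avail_of_not_guard d c x y hg
      have ha1 : 0 ≤ y := ha1
      have ha2 : y < (d.length : Int) := ha2
      have ha3 : 0 ≤ x := ha3
      have ha5 : gcell d x y = c := ha5
      by_cases hgoal : x = xg ∧ y = yg
      · simp only [dfsA, if_neg hg, if_pos hgoal] at hf
        simp at hf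
      · have hxl : x.toNat < (d.getD y.toNat []).length := by
          have := row_len_rect d hr ha1 ha2
          omega
        have hr0 : Rect (setCell d x y (-1)) := rect_setCell d _ ha3 ha1 (by omega) hr
        simp only [dfsA, if_neg hg, if_neg hgoal] at hf ⊢
        rcases h1 : dfsA fuel (setCell d x y (-1)) x (y - 1) xg yg c with ⟨b1, d1⟩
        simp only [h1] at hf ⊢
        cases b1 with
        | true => simp at hf
        | false =>
          have e1 : d1 = setCell d x y (-1) := by
            have := ih (setCell d x y (-1)) x (y - 1) hr0 (by rw [h1])
            rw [h1] at this
            exact this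
          have hrd1 : Rect d1 := by rw [e1]; exact hr0
          rcases h2 : dfsA fuel d1 (x - 1) y xg yg c with ⟨b2, d2⟩
          simp only [h2] at hf ⊢
          cases b2 with
          | true => simp at hf
          | false =>
            have e2 : d2 = d1 := by
              have := ih d1 (x - 1) y hrd1 (by rw [h2])
              rw [h2] at this
              exact this
            have hrd2 : Rect d2 := by rw [e2]; exact hrd1
            rcases h3 : dfsA fuel d2 (x + 1) y xg yg c with ⟨b3, d3⟩
            simp only [h3] at hf ⊢
            cases b3 with
            | true => simp at hf
            | false =>
              have e3 : d3 = d2 := by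
                have := ih d2 (x + 1) y hrd2 (by rw [h3])
                rw [h3] at this
                exact this
              have hrd3 : Rect d3 := by rw [e3]; exact hrd2
              rcases h4 : dfsA fuel d3 x (y + 1) xg yg c with ⟨b4, d4⟩
              simp only [h4] at hf ⊢
              cases b4 with
              | true => simp at hf
              | false =>
                have e4 : d4 = d3 := by
                  have := ih d3 x (y + 1) hrd3 (by rw [h4])
                  rw [h4] at this
                  exact this
                show setCell d4 x y c = d
                rw [e4, e3, e2, e1, ← ha5]
                exact setCell_restore d (-1) ha3 ha1 (by omega) hxl

-- one unfolding of A's recursion, with the restore lemma applied to the four calls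
theorem dfsA_succ_iff (fuel : Nat) (d : List (List Int)) (x y xg yg c : Int) (hr : Rect d)
    (hg : ¬ (y < 0 ∨ (d.length : Int) ≤ y ∨ x < 0 ∨ gcols d ≤ x ∨ gcell d x y ≠ c))
    (hgoal : ¬ (x = xg ∧ y = yg)) :
    ((dfsA (fuel + 1) d x y xg yg c).1 = true ↔
      ((dfsA fuel (setCell d x y (-1)) x (y - 1) xg yg c).1 = true ∨
        (dfsA fuel (setCell d x y (-1)) (x - 1) y xg yg c).1 = true ∨
        (dfsA fuel (setCell d x y (-1)) (x + 1) y xg yg c).1 = true ∨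
        (dfsA fuel (setCell d x y (-1)) x (y + 1) xg yg c).1 = true)) := by
  obtain ⟨ha1, ha2, ha3, ha4, ha5⟩ := avail_of_not_guard d c x y hg
  have ha1 : 0 ≤ y := ha1
  have ha2 : y < (d.length : Int) := ha2
  have ha3 : 0 ≤ x := ha3
  have hr0 : Rect (setCell d x y (-1)) := rect_setCell d _ ha3 ha1 (by omega) hr
  simp only [dfsA, if_neg hg, if_neg hgoal]
  rcases h1 : dfsA fuel (setCell d x y (-1)) x (y - 1) xg yg c with ⟨b1, d1⟩
  cases b1 with
  | true => simp
  | false =>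
    have e1 : d1 = setCell d x y (-1) := by
      have := dfsA_restore fuel (setCell d x y (-1)) x (y - 1) xg yg c hr0 (by rw [h1])
      rw [h1] at this
      exact this
    subst e1
    simp only []
    rcases h2 : dfsA fuel (setCell d x y (-1)) (x - 1) y xg yg c with ⟨b2, d2⟩
    cases b2 with
    | true => simp
    | false =>
      have e2 : d2 = setCell d x y (-1) := by
        have := dfsA_restore fuel (setCell d x y (-1)) (x - 1) y xg yg c hr0 (by rw [h2])
        rw [h2] at this
        exact this
      subst e2
      simp only []
      rcases h3 : dfsA fuel (setCell d x y (-1)) (x + 1) y xg yg c with ⟨b3, d3⟩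
      cases b3 with
      | true => simp
      | false =>
        have e3 : d3 = setCell d x y (-1) := by
          have := dfsA_restore fuel (setCell d x y (-1)) (x + 1) y xg yg c hr0 (by rw [h3])
          rw [h3] at this
          exact this
        subst e3
        simp only []
        rcases h4 : dfsA fuel (setCell d x y (-1)) x (y + 1) xg yg c with ⟨b4, d4⟩
        cases b4 with
        | true => simp
        | false => simp

theorem dfsA_sound (fuel : Nat) (d : List (List Int)) (x y xg yg c : Int) (hr : Rect d)
    (hc : c ≠ -1) (ht : (dfsA fuel d x y xg yg c).1 = true) :
    ∃ n, Reach d xg yg c (x, y) n := by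
  induction fuel generalizing d x y with
  | zero => simp [dfsA] at ht
  | succ fuel ih =>
    by_cases hg : y < 0 ∨ (d.length : Int) ≤ y ∨ x < 0 ∨ gcols d ≤ x ∨ gcell d x y ≠ c
    · simp only [dfsA, if_pos hg] at ht
      simp at ht
    · have hav : avail d c (x, y) := avail_of_not_guard d c x y hg
      by_cases hgoal : x = xg ∧ y = yg
      · obtain ⟨rfl, rfl⟩ := hgoal
        exact ⟨0, Reach.goal hav⟩
      · obtain ⟨ha1, ha2, ha3, ha4, ha5⟩ := hav
        have ha1 : 0 ≤ y := ha1
        have ha3 : 0 ≤ x := ha3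
        have hav : avail d c (x, y) := ⟨ha1, ha2, ha3, ha4, ha5⟩
        have hr0 : Rect (setCell d x y (-1)) := rect_setCell d _ ha3 ha1 (by omega) hr
        have hsub : ∀ q, avail (setCell d x y (-1)) c q → avail d c q := by
          intro q hq
          exact ((avail_setCell d c (x, y) q hav hr hc).mp hq).2
        have lift : ∀ q : Int × Int, adj (x, y) q →
            (∃ n, Reach (setCell d x y (-1)) xg yg c (q.1, q.2) n) →
              ∃ n, Reach d xg yg c (x, y) n := by
          rintro q hadj ⟨n, hn⟩
          exact ⟨n + 1, Reach.step hav hadj (reach_mono d _ xg yg c hsub q n hn)⟩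
        rcases (dfsA_succ_iff fuel d x y xg yg c hr hg hgoal).mp ht with h | h | h | h
        · exact lift (x, y - 1) (by simp [adj, nbrs]) (ih _ x (y - 1) hr0 h)
        · exact lift (x - 1, y) (by simp [adj, nbrs]) (ih _ (x - 1) y hr0 h)
        · exact lift (x + 1, y) (by simp [adj, nbrs]) (ih _ (x + 1) y hr0 h)
        · exact lift (x, y + 1) (by simp [adj, nbrs]) (ih _ x (y + 1) hr0 h)

theorem dfsA_complete (n : Nat) : ∀ (fuel : Nat) (d : List (List Int)) (x y xg yg c : Int),
    Rect d → c ≠ -1 → countC d c < fuel → Reach d xg yg c (x, y) n →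
      (dfsA fuel d x y xg yg c).1 = true := by
  induction n using Nat.strong_induction_on with
  | _ n ihn =>
    intro fuel d x y xg yg c hr hc hfuel hreach
    have hav : avail d c (x, y) := reach_avail d xg yg c (x, y) n hreach
    obtain ⟨ha1, ha2, ha3, ha4, ha5⟩ := hav
    have ha1 : 0 ≤ y := ha1
    have ha2 : y < (d.length : Int) := ha2
    have ha3 : 0 ≤ x := ha3
    have ha5 : gcell d x y = c := ha5
    have hav : avail d c (x, y) := ⟨ha1, ha2, ha3, ha4, ha5⟩
    cases fuel with
    | zero => omega
    | succ fuel =>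
      have hg : ¬ (y < 0 ∨ (d.length : Int) ≤ y ∨ x < 0 ∨ gcols d ≤ x ∨ gcell d x y ≠ c) :=
        fun h => (guard_iff d c x y).mp h hav
      by_cases hgoal : x = xg ∧ y = yg
      · simp only [dfsA, if_neg hg, if_pos hgoal]
      · cases hreach with
        | goal hgg => exact absurd ⟨rfl, rfl⟩ hgoal
        | @step _ q m hav2 hadj hq =>
          have hxl : x.toNat < (d.getD y.toNat []).length := by
            have := row_len_rect d hr ha1 ha2
            omega
          have hr0 : Rect (setCell d x y (-1)) := rect_setCell d _ ha3 ha1 (by omega) hr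
          have hcnt : countC (setCell d x y (-1)) c < countC d c :=
            countC_setCell_lt d c ha3 ha1 ha2 hxl ha5 hc
          rcases reach_avoid d xg yg c (x, y) hav hr hc q m hq (adj_ne _ _ hadj) with
            h0 | ⟨m', hm', hp'⟩
          · -- the marked neighbour call on q succeeds; pick the right disjunct
            have hqt : (dfsA fuel (setCell d x y (-1)) q.1 q.2 xg yg c).1 = true :=
              ihn m (by omega) fuel (setCell d x y (-1)) q.1 q.2 xg yg c hr0 hc (by omega) h0
            refine (dfsA_succ_iff fuel d x y xg yg c hr hg hgoal).mpr ?_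
            rcases (by simpa [adj, nbrs] using hadj : q = (x, y - 1) ∨ q = (x - 1, y) ∨
              q = (x + 1, y) ∨ q = (x, y + 1)) with rfl | rfl | rfl | rfl
            · exact Or.inl hqt
            · exact Or.inr (Or.inl hqt)
            · exact Or.inr (Or.inr (Or.inl hqt))
            · exact Or.inr (Or.inr (Or.inr hqt))
          · exact ihn m' (by omega) (fuel + 1) d x y xg yg c hr hc hfuel hp'

-- ---------- lemmas about B's flood fill ----------

theorem bpush_stack_mono (data : List (List Int)) (c : Int) (qs : List (Int × Int))
    (acc : List (Int × Int) × PySem.Set (Int × Int)) (q : Int × Int) (hq : q ∈ acc.1) :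
    q ∈ (qs.foldl (bpush data c) acc).1 := by
  induction qs generalizing acc with
  | nil => exact hq
  | cons a t ih =>
    refine ih (bpush data c acc a) ?_
    unfold bpush
    split
    · simp only [List.mem_append]
      exact Or.inl hq
    · exact hq

theorem bpush_seen_mono (data : List (List Int)) (c : Int) (qs : List (Int × Int))
    (acc : List (Int × Int) × PySem.Set (Int × Int)) (q : Int × Int) (hq : q ∈ acc.2) :
    q ∈ (qs.foldl (bpush data c) acc).2 := by
  induction qs generalizing acc with
  | nil => exact hq
  | cons a t ih =>
    refine ih (bpush data c acc a) ?_
    unfold bpush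
    split
    · exact (PySem.Set.mem_add _ _ _).mpr (Or.inl hq)
    · exact hq

theorem bpush_stack_cases (data : List (List Int)) (c : Int) (qs : List (Int × Int))
    (acc : List (Int × Int) × PySem.Set (Int × Int)) (q : Int × Int)
    (hq : q ∈ (qs.foldl (bpush data c) acc).1) :
    q ∈ acc.1 ∨ (q ∈ qs ∧ avail data c q) := by
  induction qs generalizing acc with
  | nil => exact Or.inl hq
  | cons a t ih =>
    rcases ih (bpush data c acc a) hq with h | ⟨h1, h2⟩
    · unfold bpush at h
      split at h
      · next hg =>
        rcases List.mem_append.mp h with h | h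
        · exact Or.inl h
        · have : q = a := by simpa using h
          subst this
          exact Or.inr ⟨List.mem_cons_self, ⟨hg.1, hg.2.1, hg.2.2.1, hg.2.2.2.1, hg.2.2.2.2.2⟩⟩
      · exact Or.inl h
    · exact Or.inr ⟨List.mem_cons_of_mem _ h1, h2⟩

theorem bpush_seen_cases (data : List (List Int)) (c : Int) (qs : List (Int × Int))
    (acc : List (Int × Int) × PySem.Set (Int × Int)) (q : Int × Int)
    (hq : q ∈ (qs.foldl (bpush data c) acc).2) :
    q ∈ acc.2 ∨ q ∈ (qs.foldl (bpush data c) acc).1 := by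
  induction qs generalizing acc with
  | nil => exact Or.inl hq
  | cons a t ih =>
    rcases ih (bpush data c acc a) hq with h | h
    · unfold bpush at h
      split at h
      · rcases (PySem.Set.mem_add _ _ _).mp h with h | h
        · exact Or.inl h
        · subst h
          refine Or.inr (bpush_stack_mono data c t _ q ?_)
          unfold bpush
          split
          · simp
          · next hg => exact absurd (by assumption) hg
      · exact Or.inl h
    · exact Or.inr h

theorem bpush_seen_closed (data : List (List Int)) (c : Int) (qs : List (Int × Int))
    (acc : List (Int × Int) × PySem.Set (Int × Int)) (q : Int × Int)
    (hq : q ∈ qs) (hav : avail data c q) :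
    q ∈ (qs.foldl (bpush data c) acc).2 := by
  induction qs generalizing acc with
  | nil => cases hq
  | cons a t ih =>
    rcases List.mem_cons.mp hq with rfl | hq
    · refine bpush_seen_mono data c t _ q ?_
      unfold bpush
      obtain ⟨h1, h2, h3, h4, h5⟩ := hav
      by_cases hs : q ∈ acc.2
      · rw [if_neg (by intro hg; exact hg.2.2.2.2.1 hs)]
        exact hs
      · rw [if_pos ⟨h1, h2, h3, h4, hs, h5⟩]
        exact (PySem.Set.mem_add _ _ _).mpr (Or.inr rfl)
    · exact ih (bpush data c acc a) hq

theorem bpush_one_sub (data : List (List Int)) (c : Int)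
    (acc : List (Int × Int) × PySem.Set (Int × Int))
    (hsub : ∀ q ∈ acc.1, q ∈ acc.2) (a : Int × Int) :
    ∀ q ∈ (bpush data c acc a).1, q ∈ (bpush data c acc a).2 := by
  intro r hr
  unfold bpush at hr ⊢
  split
  · next hg =>
    rw [if_pos hg] at hr
    rcases List.mem_append.mp hr with h | h
    · exact (PySem.Set.mem_add _ _ _).mpr (Or.inl (hsub r h))
    · exact (PySem.Set.mem_add _ _ _).mpr (Or.inr (by simpa using h))
  · next hg =>
    rw [if_neg hg] at hr
    exact hsub r hr

theorem bpush_stack_sub_seen (data : List (List Int)) (c : Int) (qs : List (Int × Int)) :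
    ∀ acc : List (Int × Int) × PySem.Set (Int × Int), (∀ q ∈ acc.1, q ∈ acc.2) →
      ∀ q ∈ (qs.foldl (bpush data c) acc).1, q ∈ (qs.foldl (bpush data c) acc).2 := by
  induction qs with
  | nil => exact fun acc hsub => hsub
  | cons a t ih =>
    intro acc hsub
    exact ih (bpush data c acc a) (bpush_one_sub data c acc hsub a)

theorem conn_avail_left (data : List (List Int)) (c : Int) (p q : Int × Int)
    (h : Conn data c p q) : avail data c p := by
  induction h with
  | refl ha => exact ha
  | tail _ _ _ ih => exact ih

theorem conn_avail_right (data : List (List Int)) (c : Int) (p q : Int × Int)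
    (h : Conn data c p q) : avail data c q := by
  cases h with
  | refl ha => exact ha
  | tail _ _ ha => exact ha

theorem conn_head (data : List (List Int)) (c : Int) (p q r : Int × Int)
    (hp : avail data c p) (hadj : adj p q) (h : Conn data c q r) : Conn data c p r := by
  induction h with
  | refl ha => exact Conn.tail (Conn.refl p hp) hadj ha
  | tail _ hadj' ha ih => exact Conn.tail ih hadj' ha

theorem reach_to_conn (data : List (List Int)) (xg yg c : Int) (p : Int × Int) (n : Nat)
    (h : Reach data xg yg c p n) : Conn data c p (xg, yg) := by
  induction h with
  | goal hg => exact Conn.refl _ hg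
  | step ha hadj _ ih => exact conn_head data c _ _ _ ha hadj ih

theorem conn_to_reach_aux (data : List (List Int)) (xg yg c : Int) (p b : Int × Int)
    (h : Conn data c p b) (hb : ∃ n, Reach data xg yg c b n) :
    ∃ n, Reach data xg yg c p n := by
  induction h with
  | refl _ => exact hb
  | @tail q r hconn hadj ha ih =>
    rcases hb with ⟨n, hn⟩
    exact ih ⟨n + 1, Reach.step (conn_avail_right data c _ _ hconn) hadj hn⟩

theorem conn_to_reach (data : List (List Int)) (xg yg c : Int) (p : Int × Int)
    (h : Conn data c p (xg, yg)) : ∃ n, Reach data xg yg c p n :=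
  conn_to_reach_aux data xg yg c p (xg, yg) h
    ⟨0, Reach.goal (conn_avail_right data c _ _ h)⟩

theorem conn_in_closed (data : List (List Int)) (c : Int) (fin : List (Int × Int))
    (hcl : ∀ q ∈ fin, ∀ q' ∈ nbrs q, avail data c q' → q' ∈ fin)
    (s b : Int × Int) (h : Conn data c s b) (hs : s ∈ fin) : b ∈ fin := by
  induction h with
  | refl _ => exact hs
  | @tail q r hconn hadj ha ih => exact hcl q ih r hadj ha

theorem bloop_true (data : List (List Int)) (xg yg c : Int) (s : Int × Int) :
    ∀ (stack : List (Int × Int)) (seen : PySem.Set (Int × Int)),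
      (∀ q ∈ stack, Conn data c s q) →
      (bloop data xg yg c stack seen).1 = true → Conn data c s (xg, yg) := by
  intro stack seen
  fun_induction bloop data xg yg c stack seen with
  | case1 h =>
    intro _ ht
    simp at ht
  | case2 stack seen h p hgoal =>
    intro hconn _
    have hp : Conn data c s p := hconn p (List.getLast_mem h)
    have : (xg, yg) = p := by
      rcases p with ⟨a, b⟩
      simp at hgoal
      simp [hgoal.1, hgoal.2]
    rw [this]
    exact hp
  | case3 stack seen h p hgoal r ih =>
    intro hconn ht
    refine ih ?_ ht
    intro q hq
    rcases bpush_stack_cases data c (nbrs p) (stack.dropLast, seen) q hq with hq' | ⟨hq1, hq2⟩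
    · exact hconn q (List.Sublist.subset (List.dropLast_sublist _) hq')
    · exact Conn.tail (hconn p (List.getLast_mem h)) hq1 hq2

theorem bloop_false (data : List (List Int)) (xg yg c : Int) :
    ∀ (stack : List (Int × Int)) (seen : PySem.Set (Int × Int)),
      (∀ q ∈ stack, q ∈ seen) →
      (∀ q ∈ seen, q ∉ stack →
        ¬ (q.1 = xg ∧ q.2 = yg) ∧ ∀ q' ∈ nbrs q, avail data c q' → q' ∈ seen) →
      (bloop data xg yg c stack seen).1 = false →
      (∀ q ∈ (bloop data xg yg c stack seen).2,
          ¬ (q.1 = xg ∧ q.2 = yg) ∧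
            ∀ q' ∈ nbrs q, avail data c q' → q' ∈ (bloop data xg yg c stack seen).2) ∧
        ∀ q ∈ seen, q ∈ (bloop data xg yg c stack seen).2 := by
  intro stack seen
  fun_induction bloop data xg yg c stack seen with
  | case1 h =>
    intro hsub hinv _
    refine ⟨?_, fun q hq => hq⟩
    intro q hq
    exact hinv q hq (by simp)
  | case2 stack seen h p hgoal =>
    intro _ _ hf
    simp at hf
  | case3 stack seen h p hgoal r ih =>
    intro hsub hinv hf
    have hstack_eq : stack.dropLast ++ [p] = stack := List.dropLast_append_getLast h
    have hsub' : ∀ q ∈ r.1, q ∈ r.2 := by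
      refine bpush_stack_sub_seen data c (nbrs p) (stack.dropLast, seen) ?_
      intro q hq
      exact hsub q (by rw [← hstack_eq]; exact List.mem_append_left _ hq)
    have hinv' : ∀ q ∈ r.2, q ∉ r.1 →
        ¬ (q.1 = xg ∧ q.2 = yg) ∧ ∀ q' ∈ nbrs q, avail data c q' → q' ∈ r.2 := by
      intro q hq hqs
      rcases bpush_seen_cases data c (nbrs p) (stack.dropLast, seen) q hq with hq' | hq'
      · -- q was already seen
        by_cases hqstack : q ∈ stack
        · -- q must be the popped p
          have hqp : q = p := by
            rcases List.mem_append.mp (by rw [hstack_eq]; exact hqstack :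
              q ∈ stack.dropLast ++ [p]) with h' | h'
            · exact absurd (bpush_stack_mono data c (nbrs p) (stack.dropLast, seen) q h') hqs
            · simpa using h'
          subst hqp
          refine ⟨hgoal, ?_⟩
          intro q' hq' hav
          exact bpush_seen_closed data c (nbrs p) (stack.dropLast, seen) q' hq' hav
        · obtain ⟨hng, hcl⟩ := hinv q hq' hqstack
          exact ⟨hng, fun q' hq'' hav =>
            bpush_seen_mono data c (nbrs p) (stack.dropLast, seen) q' (hcl q' hq'' hav)⟩
      · exact absurd hq' hqs
    obtain ⟨hfin, hmono⟩ := ih hsub' hinv' hf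
    refine ⟨hfin, ?_⟩
    intro q hq
    exact hmono q (bpush_seen_mono data c (nbrs p) (stack.dropLast, seen) q hq)

theorem dfs_alt_true_iff (data : List (List Int)) (x y xg yg c : Int) :
    dfs_alt data x y xg yg c = true ↔ Conn data c (x, y) (xg, yg) := by
  unfold dfs_alt
  split
  · next hg =>
    simp only [Bool.false_eq_true, false_iff]
    intro hconn
    exact (guard_iff data c x y).mp hg (conn_avail_left data c _ _ hconn)
  · next hg =>
    have hav : avail data c (x, y) := avail_of_not_guard data c x y hg
    constructor
    · intro ht
      refine bloop_true data xg yg c (x, y) [(x, y)] (PySem.Set.ofList [(x, y)]) ?_ ht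
      intro q hq
      have : q = (x, y) := by simpa using hq
      subst this
      exact Conn.refl _ hav
    · intro hconn
      by_contra hf
      have hf : (bloop data xg yg c [(x, y)] (PySem.Set.ofList [(x, y)])).1 = false := by
        cases hb : (bloop data xg yg c [(x, y)] (PySem.Set.ofList [(x, y)])).1
        · rfl
        · exact absurd hb hf
      have hofl : (PySem.Set.ofList [(x, y)] : PySem.Set (Int × Int)) = [(x, y)] := rfl
      obtain ⟨hfin, hmono⟩ := bloop_false data xg yg c [(x, y)] (PySem.Set.ofList [(x, y)])
        (by intro q hq; rw [hofl]; simpa using hq)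
        (by
          intro q hq hqs
          rw [hofl] at hq
          exact absurd (by simpa using hq : q = (x, y)) (by simpa using hqs))
        hf
      have hgoal_in : (xg, yg) ∈ (bloop data xg yg c [(x, y)] (PySem.Set.ofList [(x, y)])).2 := by
        refine conn_in_closed data c _ ?_ (x, y) (xg, yg) hconn ?_
        · intro q hq q' hq' hav'
          exact (hfin q hq).2 q' hq' hav'
        · exact hmono (x, y) (by rw [hofl]; simp)
      exact (hfin (xg, yg) hgoal_in).1 ⟨rfl, rfl⟩

theorem dfs_true_iff (data : List (List Int)) (x y xg yg c : Int) (hr : Rect data)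
    (hc : c ≠ -1) : dfs data x y xg yg c = true ↔ Conn data c (x, y) (xg, yg) := by
  unfold dfs
  constructor
  · intro ht
    rcases dfsA_sound (countC data c + 1) data x y xg yg c hr hc ht with ⟨n, hn⟩
    exact reach_to_conn data xg yg c (x, y) n hn
  · intro hconn
    rcases conn_to_reach data xg yg c (x, y) hconn with ⟨n, hn⟩
    exact dfsA_complete n (countC data c + 1) data x y xg yg c hr hc (by omega) hn

theorem dfs_spec : Claim_equal_dfs := by
  intro data x y xg yg c hdom hpre
  unfold Spec_dfs
  rcases hpre with himm | ⟨hr, hc⟩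
  · have hg : y < 0 ∨ (data.length : Int) ≤ y ∨ x < 0 ∨ gcols data ≤ x ∨ gcell data x y ≠ c := by
      unfold ImmFalse at himm
      rcases himm with h | h | h | h | h
      · exact Or.inl h
      · exact Or.inr (Or.inl h)
      · exact Or.inr (Or.inr (Or.inl h))
      · exact Or.inr (Or.inr (Or.inr (Or.inl h)))
      · exact Or.inr (Or.inr (Or.inr (Or.inr h.2)))
    simp only [dfs, dfs_alt, dfsA, if_pos hg]
  · have h1 := dfs_true_iff data x y xg yg c hr hc
    have h2 := dfs_alt_true_iff data x y xg yg c
    cases hB : dfs_alt data x y xg yg c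
    · cases hA : dfs data x y xg yg c
      · rfl
      · have := h2.mpr (h1.mp hA)
        rw [hB] at this
        exact absurd this (by simp)
    · exact h1.mpr (h2.mp hB)
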